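-- pv_equiv track=rewrite | github.com/iheuze/Code-Wars | Product of the main diagonal of a square matrix .py | main_diagonal_product
-- ===== SOURCE A (Python) =====
-- def main_diagonal_product(matrix):
--     # Check if the matrix is empty
--     if not matrix or not matrix[0]:
--         return None
--
--     # Check if the matrix is square
--     if len(matrix) != len(matrix[0]):
--         return None
--
--     # Calculate the product of the main diagonal
--     product = 1
--     for i in range(len(matrix)):
--         if len(matrix[i]) > i:  # Check if the diagonal element exists
--             product *= matrix[i][i]
--         else:
--             return None  # Return None if the matrix is not well-formed
--
--     return product
-- ===== SOURCE B (Python) =====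
-- def _prod(xs):
--     return 1 if not xs else xs[0] * _prod(xs[1:])
--
-- def main_diagonal_product(matrix):
--     n = len(matrix)
--     if n == 0 or not matrix[0] or len(matrix[0]) != n:
--         return None
--     if not all(len(matrix[i]) > i for i in range(n)):
--         return None
--     return _prod([matrix[i][i] for i in range(n)])
-- ===== Notes on version B (the rewrite author's own statement) =====
-- stated objective: idiomatic
-- what changed: B separates validation from multiplication: one all() pass checks every diagonal element exists, then the product is computed (recursively) over the extracted diagonal, instead of A's single loop interleaving the existence check with the running product and an early return.
import Mathlib
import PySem

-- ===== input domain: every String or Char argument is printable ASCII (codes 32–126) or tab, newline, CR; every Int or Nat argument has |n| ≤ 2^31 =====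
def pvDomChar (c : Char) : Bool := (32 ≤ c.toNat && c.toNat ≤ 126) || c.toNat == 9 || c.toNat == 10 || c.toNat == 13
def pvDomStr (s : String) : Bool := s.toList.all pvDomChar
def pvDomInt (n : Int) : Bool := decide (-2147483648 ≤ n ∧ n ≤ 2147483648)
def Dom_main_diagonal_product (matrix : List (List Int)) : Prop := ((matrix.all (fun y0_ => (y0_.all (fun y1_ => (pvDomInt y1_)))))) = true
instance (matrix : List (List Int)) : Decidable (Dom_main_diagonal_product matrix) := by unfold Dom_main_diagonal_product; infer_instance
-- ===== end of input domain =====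

-- B separates an all() validation pass over the diagonal from a recursive product over the
-- extracted diagonal; A interleaves the check with the running product in one early-return loop.

-- ===== PORT A =====
-- A's 'for i in range(len(matrix))' loop with early 'return None': Option-state fold over the range.
def main_diagonal_product (matrix : List (List Int)) : Option Int :=
  if matrix = [] ∨ matrix.headD [] = [] then none
  else if matrix.length ≠ (matrix.headD []).length then none
  else
    (PySem.List.pyRange 0 matrix.length 1).foldl
      (fun acc i =>
        acc.bind (fun product =>
          if (matrix.getD i.toNat []).length > i.toNat then
            some (product * (matrix.getD i.toNat []).getD i.toNat 0)
          else none))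
      (some 1)

-- ===== PORT B =====
-- port of Source B's recursive _prod
def prodRec : List Int → Int
  | [] => 1
  | x :: xs => x * prodRec xs

def main_diagonal_product_alt (matrix : List (List Int)) : Option Int :=
  let n := matrix.length
  if n = 0 ∨ matrix.headD [] = [] ∨ (matrix.headD []).length ≠ n then none
  else if ¬ ((PySem.List.pyRange 0 n 1).all
        (fun i => (matrix.getD i.toNat []).length > i.toNat)) then none
  else some (prodRec ((PySem.List.pyRange 0 n 1).map
        (fun i => (matrix.getD i.toNat []).getD i.toNat 0)))

-- ===== PRECONDITION & SPEC =====
def Spec_main_diagonal_product (matrix : List (List Int)) (out : Option Int) : Prop := out = main_diagonal_product_alt matrix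
instance (matrix : List (List Int)) (out : Option Int) : Decidable (Spec_main_diagonal_product matrix out) := by unfold Spec_main_diagonal_product; infer_instance

-- ===== CLAIM (what is proved, stated in full; the proofs are below) =====
def Claim_equal_main_diagonal_product : Prop := ∀ (matrix : List (List Int)), Dom_main_diagonal_product matrix → Spec_main_diagonal_product matrix (main_diagonal_product matrix)

-- ===== LEMMAS AND PROOFS =====

-- A's loop body maps a none accumulator to none (a taken early return stays taken).
theorem loopA_none (m : List (List Int)) (l : List Int) :
    l.foldl
      (fun acc i =>
        acc.bind (fun product =>
          if (m.getD i.toNat []).length > i.toNat then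
            some (product * (m.getD i.toNat []).getD i.toNat 0)
          else none))
      (none : Option Int) = none := by
  induction l with
  | nil => rfl
  | cons j t iht => simpa using iht

-- A's Option-state loop, on any index list, equals B's validate-then-multiply decomposition.
theorem loopA_eq (m : List (List Int)) (l : List Int) (p : Int) :
    l.foldl
      (fun acc i =>
        acc.bind (fun product =>
          if (m.getD i.toNat []).length > i.toNat then
            some (product * (m.getD i.toNat []).getD i.toNat 0)
          else none))
      (some p)
    = if l.all (fun i => (m.getD i.toNat []).length > i.toNat) then
        some (p * prodRec (l.map (fun i => (m.getD i.toNat []).getD i.toNat 0)))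
      else none := by
  induction l generalizing p with
  | nil => simp [prodRec]
  | cons i rest ih =>
    simp only [List.foldl_cons, List.all_cons, List.map_cons,
      Bool.and_eq_true, decide_eq_true_eq]
    rw [show ((some p).bind fun product =>
        if (m.getD i.toNat []).length > i.toNat then
          some (product * (m.getD i.toNat []).getD i.toNat 0)
        else none)
      = if (m.getD i.toNat []).length > i.toNat then
          some (p * (m.getD i.toNat []).getD i.toNat 0)
        else none from rfl]
    by_cases h : (m.getD i.toNat []).length > i.toNat
    · rw [if_pos h, ih]
      by_cases hall : (rest.all (fun i => decide ((m.getD i.toNat []).length > i.toNat))) = true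
      · rw [if_pos hall, if_pos ⟨h, hall⟩]
        simp only [prodRec]
        rw [mul_assoc]
      · rw [if_neg hall, if_neg (fun hc => hall hc.2)]
    · rw [if_neg h, loopA_none, if_neg (fun hc => h hc.1)]

-- ===== VERDICT (by name: the statement is the Claim_ definition above) =====
theorem main_diagonal_product_spec : Claim_equal_main_diagonal_product := by
  intro matrix _
  unfold Spec_main_diagonal_product main_diagonal_product main_diagonal_product_alt
  by_cases hE : matrix = []
  · subst hE; rfl
  · by_cases hH : matrix.headD [] = []
    · rw [if_pos (Or.inr hH), if_pos (Or.inr (Or.inl hH))]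
    · by_cases hL : (matrix.headD []).length = matrix.length
      · have hn0 : matrix.length ≠ 0 := fun h => hE (List.length_eq_zero_iff.mp h)
        rw [if_neg (fun hc => hc.elim hE hH), if_neg (fun hc => hc hL.symm),
          if_neg (fun hc => hc.elim hn0 (fun hc' => hc'.elim hH (fun h2 => h2 hL))),
          loopA_eq]
        by_cases hall : ((PySem.List.pyRange 0 (matrix.length : Int) 1).all
            (fun i => decide ((matrix.getD i.toNat []).length > i.toNat))) = true
        · rw [if_pos hall, if_neg (not_not_intro hall), one_mul]
        · rw [if_neg hall, if_pos hall]
      · rw [if_neg (fun hc => hc.elim hE hH), if_pos (fun h => hL h.symm),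
          if_pos (Or.inr (Or.inr hL))]
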